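-- pv_equiv track=rewrite | github.com/pettarin/wiktts | wiktts/trainer/templates/compute_er_phonetisaurus_master.py | compute_penalty_matrix
-- ===== SOURCE A (Python) =====
-- def compute_penalty_matrix( hyp, ref ):
--     """
--       Compute the penalty matrix using the levenshtein algorithm.
--       The edit distance between the two sequences will be stored
--         in the last entry in the matrix.
--     """
--     matrix = [ [0 for x in range(len(ref)+1)] for y in range(len(hyp)+1) ]
--     for i in range(len(hyp)+1):
--         matrix[i][0] = i
--     for j in range(len(ref)+1):
--         matrix[0][j] = j
--
--     for i in range(1,len(hyp)+1):
--         for j in range(1,len(ref)+1):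
--             if hyp[i-1]==ref[j-1]:
--                 matrix[i][j] = matrix[i-1][j-1]
--             else:
--                 matrix[i][j] = min( matrix[i-1][j]+1, matrix[i][j-1]+1, matrix[i-1][j-1]+1 )
--
--     return [matrix,hyp,ref]
-- ===== SOURCE B (Python) =====
-- def compute_penalty_matrix(hyp, ref):
--     """Top-down memoized Levenshtein: a recursive d(i, j) cached in a dict,
--     driven cell by cell (so the recursion stays shallow)."""
--     memo = {}
--
--     def d(i, j):
--         if (i, j) in memo:
--             return memo[(i, j)]
--         if i == 0:
--             v = j
--         elif j == 0:
--             v = i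
--         elif hyp[i - 1] == ref[j - 1]:
--             v = d(i - 1, j - 1)
--         else:
--             v = 1 + min(d(i - 1, j), d(i, j - 1), d(i - 1, j - 1))
--         memo[(i, j)] = v
--         return v
--
--     matrix = [[d(i, j) for j in range(len(ref) + 1)]
--               for i in range(len(hyp) + 1)]
--     return [matrix, hyp, ref]
-- ===== Notes on version B (the rewrite author's own statement) =====
-- stated objective: alternative
-- what changed: Replaces A's pre-allocated matrix filled bottom-up by index assignment with top-down memoized recursion: a recursive d(i,j) with a dict cache, driven cell by cell to build the rows.
import Mathlib
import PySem

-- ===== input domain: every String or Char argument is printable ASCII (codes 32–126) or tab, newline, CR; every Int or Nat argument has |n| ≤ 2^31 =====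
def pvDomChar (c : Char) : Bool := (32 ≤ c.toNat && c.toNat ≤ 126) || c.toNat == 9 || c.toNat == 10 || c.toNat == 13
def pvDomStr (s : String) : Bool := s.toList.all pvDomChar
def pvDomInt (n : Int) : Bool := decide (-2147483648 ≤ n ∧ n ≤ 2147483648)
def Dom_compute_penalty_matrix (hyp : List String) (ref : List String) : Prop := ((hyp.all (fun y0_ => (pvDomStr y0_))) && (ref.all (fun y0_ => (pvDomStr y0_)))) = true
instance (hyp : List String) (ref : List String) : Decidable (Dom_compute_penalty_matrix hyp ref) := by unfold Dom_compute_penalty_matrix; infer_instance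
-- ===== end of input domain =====

-- B replaces A's pre-allocated matrix filled bottom-up by index assignment with
-- top-down memoized recursion (a recursive d(i,j) with a dict cache, driven cell
-- by cell); same cost, same return value.

-- ===== PORT A =====
-- matrix[i][j] read/write; all indices A uses are non-negative and in range, so Nat
-- indexing with getD/set is exact Python semantics here.
def pvGet2 (m : List (List Int)) (i j : Nat) : Int := (m.getD i []).getD j 0
def pvSet2 (m : List (List Int)) (i j : Nat) (v : Int) : List (List Int) :=
  m.set i ((m.getD i []).set j v)

-- literal transliteration of A: zero matrix, first column, first row, then the nested
-- loops (Python range(1, k+1) rendered as range k with the loop variable shifted by 1).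
def compute_penalty_matrix (hyp : List String) (ref : List String) : List (List Int) × List String × List String :=
  let m0 : List (List Int) :=
    (List.range (hyp.length + 1)).map (fun _ => (List.range (ref.length + 1)).map (fun _ => (0 : Int)))
  let m1 := (List.range (hyp.length + 1)).foldl (fun m i => pvSet2 m i 0 (Int.ofNat i)) m0
  let m2 := (List.range (ref.length + 1)).foldl (fun m j => pvSet2 m 0 j (Int.ofNat j)) m1
  let m3 := (List.range hyp.length).foldl (fun m i' =>
    (List.range ref.length).foldl (fun m j' =>
      if hyp.getD ((i' + 1) - 1) "" == ref.getD ((j' + 1) - 1) "" then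
        pvSet2 m (i' + 1) (j' + 1) (pvGet2 m ((i' + 1) - 1) ((j' + 1) - 1))
      else
        pvSet2 m (i' + 1) (j' + 1) (min (pvGet2 m ((i' + 1) - 1) (j' + 1) + 1)
          (min (pvGet2 m (i' + 1) ((j' + 1) - 1) + 1) (pvGet2 m ((i' + 1) - 1) ((j' + 1) - 1) + 1)))) m) m2
  (m3, hyp, ref)

-- ===== PORT B =====
-- Source B's recursive helper d(i, j) with its dict cache `memo`; Python's mutation of
-- memo is threaded explicitly (each call returns value and updated cache); dict
-- semantics (first match / overwrite) via PySem.Dict.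
def pvD (hyp ref : List String) (i j : Nat) (memo : PySem.Dict (Nat × Nat) Int) :
    Int × PySem.Dict (Nat × Nat) Int :=
  match memo.get? (i, j) with
  | some v => (v, memo)
  | none =>
    match i, j with
    | 0, j => (Int.ofNat j, memo.insert (0, j) (Int.ofNat j))
    | Nat.succ i', 0 => (Int.ofNat (i' + 1), memo.insert (i' + 1, 0) (Int.ofNat (i' + 1)))
    | Nat.succ i', Nat.succ j' =>
      if hyp.getD i' "" == ref.getD j' "" then
        let p := pvD hyp ref i' j' memo
        (p.1, p.2.insert (i' + 1, j' + 1) p.1)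
      else
        let pa := pvD hyp ref i' (j' + 1) memo
        let pb := pvD hyp ref (i' + 1) j' pa.2
        let pc := pvD hyp ref i' j' pb.2
        let v := 1 + min pa.1 (min pb.1 pc.1)
        (v, pc.2.insert (i' + 1, j' + 1) v)
termination_by (i, j)

-- inner comprehension: [d(i, j) for j in range(len(ref)+1)], threading the cache
def pvRowB (hyp ref : List String) (i : Nat) (memo : PySem.Dict (Nat × Nat) Int) :
    List Int × PySem.Dict (Nat × Nat) Int :=
  (List.range (ref.length + 1)).foldl
    (fun st j => let p := pvD hyp ref i j st.2; (st.1 ++ [p.1], p.2)) ([], memo)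

def compute_penalty_matrix_alt (hyp : List String) (ref : List String) : List (List Int) × List String × List String :=
  let st := (List.range (hyp.length + 1)).foldl
    (fun st i => let p := pvRowB hyp ref i st.2; (st.1 ++ [p.1], p.2))
    (([] : List (List Int)), (PySem.Dict.empty : PySem.Dict (Nat × Nat) Int))
  (st.1, hyp, ref)

-- ===== PRECONDITION & SPEC =====
def Spec_compute_penalty_matrix (hyp : List String) (ref : List String) (out : List (List Int) × List String × List String) : Prop := out = compute_penalty_matrix_alt hyp ref
instance (hyp : List String) (ref : List String) (out : List (List Int) × List String × List String) : Decidable (Spec_compute_penalty_matrix hyp ref out) := by unfold Spec_compute_penalty_matrix; infer_instance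

-- ===== CLAIM (what is proved, stated in full; the proofs are below) =====
def Claim_equal_compute_penalty_matrix : Prop := ∀ (hyp : List String) (ref : List String), Dom_compute_penalty_matrix hyp ref → Spec_compute_penalty_matrix hyp ref (compute_penalty_matrix hyp ref)

-- ===== LEMMAS AND PROOFS =====

-- the Levenshtein recurrence both programs tabulate, and its rows
def pvLev (hyp ref : List String) : Nat → Nat → Int
  | 0, j => Int.ofNat j
  | i + 1, 0 => Int.ofNat (i + 1)
  | i + 1, j + 1 =>
    if hyp.getD i "" == ref.getD j "" then pvLev hyp ref i j
    else min (pvLev hyp ref i (j + 1) + 1)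
      (min (pvLev hyp ref (i + 1) j + 1) (pvLev hyp ref i j + 1))
  termination_by i j => (i, j)

def pvLevRow (hyp ref : List String) (i : Nat) : List Int :=
  (List.range (ref.length + 1)).map (pvLev hyp ref i)

lemma pv_getD_range_map {α : Type} (f : Nat → α) (m t : Nat) (d : α) (ht : t < m) :
    (((List.range m).map f).getD t d) = f t := by
  simp [List.getD, ht]

lemma pv_min_shift (a b c : Int) : 1 + min a (min b c) = min (a + 1) (min (b + 1) (c + 1)) := by omega

-- ---- B side: the memo invariant ----
def pvMemoOK (hyp ref : List String) (memo : PySem.Dict (Nat × Nat) Int) : Prop :=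
  ∀ i j v, memo.get? (i, j) = some v → v = pvLev hyp ref i j

lemma pvMemoOK_empty (hyp ref : List String) :
    pvMemoOK hyp ref (PySem.Dict.empty : PySem.Dict (Nat × Nat) Int) := by
  intro i j v h
  simp [PySem.Dict.get?_empty] at h

lemma pvMemoOK_insert (hyp ref : List String) (memo : PySem.Dict (Nat × Nat) Int)
    (hok : pvMemoOK hyp ref memo) (i j : Nat) (v : Int) (hv : v = pvLev hyp ref i j) :
    pvMemoOK hyp ref (memo.insert (i, j) v) := by
  intro i' j' v' h
  rw [PySem.Dict.get?_insert] at h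
  split_ifs at h with hkey
  · obtain ⟨h1, h2⟩ := Prod.mk.injEq .. ▸ hkey
    cases h; subst h1; subst h2; exact hv
  · exact hok i' j' v' h

lemma pvD_spec (hyp ref : List String) :
    ∀ i j (memo : PySem.Dict (Nat × Nat) Int), pvMemoOK hyp ref memo →
      (pvD hyp ref i j memo).1 = pvLev hyp ref i j ∧ pvMemoOK hyp ref (pvD hyp ref i j memo).2 := by
  intro i
  induction i with
  | zero =>
    intro j memo hok
    rw [pvD]
    cases hget : memo.get? (0, j) with
    | some v => exact ⟨hok 0 j v hget, hok⟩
    | none =>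
      refine ⟨by rw [pvLev.eq_1], pvMemoOK_insert hyp ref memo hok 0 j _ (by rw [pvLev.eq_1])⟩
  | succ i' ihi =>
    intro j
    induction j with
    | zero =>
      intro memo hok
      rw [pvD]
      cases hget : memo.get? (i' + 1, 0) with
      | some v => exact ⟨hok (i' + 1) 0 v hget, hok⟩
      | none =>
        exact ⟨by rw [pvLev.eq_2], pvMemoOK_insert hyp ref memo hok (i' + 1) 0 _ (by rw [pvLev.eq_2])⟩
    | succ j' ihj =>
      intro memo hok
      rw [pvD]
      cases hget : memo.get? (i' + 1, j' + 1) with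
      | some v => exact ⟨hok (i' + 1) (j' + 1) v hget, hok⟩
      | none =>
        by_cases hc : (hyp.getD i' "" == ref.getD j' "") = true
        · simp only [hc, if_true]
          obtain ⟨h1, h2⟩ := ihi j' memo hok
          have hv : (pvD hyp ref i' j' memo).1 = pvLev hyp ref (i' + 1) (j' + 1) := by
            rw [pvLev.eq_3, if_pos hc, h1]
          exact ⟨hv, pvMemoOK_insert hyp ref _ h2 (i' + 1) (j' + 1) _ hv⟩
        · simp only [hc, if_false]
          obtain ⟨ha1, ha2⟩ := ihi (j' + 1) memo hok
          obtain ⟨hb1, hb2⟩ := ihj _ ha2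
          obtain ⟨hc1, hc2⟩ := ihi j' _ hb2
          have hv : 1 + min (pvD hyp ref i' (j' + 1) memo).1
              (min (pvD hyp ref (i' + 1) j' (pvD hyp ref i' (j' + 1) memo).2).1
                (pvD hyp ref i' j' (pvD hyp ref (i' + 1) j' (pvD hyp ref i' (j' + 1) memo).2).2).1)
              = pvLev hyp ref (i' + 1) (j' + 1) := by
            rw [ha1, hb1, hc1, pvLev.eq_3, if_neg hc, pv_min_shift]
          exact ⟨hv, pvMemoOK_insert hyp ref _ hc2 (i' + 1) (j' + 1) _ hv⟩

-- the inner comprehension produces row i of the pvLev table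
lemma pvRowB_fold (hyp ref : List String) (i : Nat) :
    ∀ (n : Nat) (acc : List Int) (memo : PySem.Dict (Nat × Nat) Int), pvMemoOK hyp ref memo →
      ((List.range n).foldl
        (fun st j => let p := pvD hyp ref i j st.2; (st.1 ++ [p.1], p.2)) (acc, memo)).1
        = acc ++ (List.range n).map (pvLev hyp ref i)
      ∧ pvMemoOK hyp ref (((List.range n).foldl
        (fun st j => let p := pvD hyp ref i j st.2; (st.1 ++ [p.1], p.2)) (acc, memo)).2) := by
  intro n
  induction n with
  | zero => intro acc memo hok; simpa using hok
  | succ n ih =>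
    intro acc memo hok
    simp only [List.range_succ, List.foldl_append, List.foldl_cons, List.foldl_nil, List.map_append, List.map_cons, List.map_nil]
    obtain ⟨h1, h2⟩ := ih acc memo hok
    set st := (List.range n).foldl
      (fun st j => let p := pvD hyp ref i j st.2; (st.1 ++ [p.1], p.2)) (acc, memo) with hst
    obtain ⟨hd1, hd2⟩ := pvD_spec hyp ref i n st.2 h2
    exact ⟨by simp [h1, hd1], hd2⟩

lemma pvRowB_spec (hyp ref : List String) (i : Nat) (memo : PySem.Dict (Nat × Nat) Int)
    (hok : pvMemoOK hyp ref memo) :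
    (pvRowB hyp ref i memo).1 = pvLevRow hyp ref i ∧
    pvMemoOK hyp ref (pvRowB hyp ref i memo).2 := by
  have := pvRowB_fold hyp ref i (ref.length + 1) [] memo hok
  simpa [pvRowB, pvLevRow] using this

-- the outer comprehension produces the rows in order
lemma pvAlt_fold (hyp ref : List String) :
    ∀ (n : Nat) (acc : List (List Int)) (memo : PySem.Dict (Nat × Nat) Int), pvMemoOK hyp ref memo →
      ((List.range n).foldl
        (fun st i => let p := pvRowB hyp ref i st.2; (st.1 ++ [p.1], p.2)) (acc, memo)).1
        = acc ++ (List.range n).map (pvLevRow hyp ref) := by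
  intro n
  induction n with
  | zero => intro acc memo _; simp
  | succ n ih =>
    intro acc memo hok
    simp only [List.range_succ, List.foldl_append, List.foldl_cons, List.foldl_nil, List.map_append, List.map_cons, List.map_nil]
    -- need also the invariant at the intermediate state; re-derive it by a parallel induction
    have hinv : ∀ (m : Nat) (a : List (List Int)) (d : PySem.Dict (Nat × Nat) Int), pvMemoOK hyp ref d →
        pvMemoOK hyp ref (((List.range m).foldl
          (fun st i => let p := pvRowB hyp ref i st.2; (st.1 ++ [p.1], p.2)) (a, d)).2) := by
      intro m
      induction m with
      | zero => intro a d h; simpa using h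
      | succ m ihm =>
        intro a d h
        simp only [List.range_succ, List.foldl_append, List.foldl_cons, List.foldl_nil]
        set st := (List.range m).foldl
          (fun st i => let p := pvRowB hyp ref i st.2; (st.1 ++ [p.1], p.2)) (a, d) with hst
        exact (pvRowB_spec hyp ref m st.2 (ihm a d h)).2
    set st := (List.range n).foldl
      (fun st i => let p := pvRowB hyp ref i st.2; (st.1 ++ [p.1], p.2)) (acc, memo) with hst
    have h1 := ih acc memo hok
    have h2 := hinv n acc memo hok
    rw [← hst] at h1 h2
    obtain ⟨hr1, _⟩ := pvRowB_spec hyp ref n st.2 h2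
    simp [hr1, h1]

theorem compute_penalty_matrix_alt_matrix_eq (hyp ref : List String) :
    (compute_penalty_matrix_alt hyp ref).1 = (List.range (hyp.length + 1)).map (pvLevRow hyp ref) := by
  simp only [compute_penalty_matrix_alt]
  have := pvAlt_fold hyp ref (hyp.length + 1) [] PySem.Dict.empty (pvMemoOK_empty hyp ref)
  simpa using this

-- ---- A side ----
lemma pv_set_append {α} (a b : List α) (k : Nat) (v : α) :
    (a ++ b).set (a.length + k) v = a ++ b.set k v := by
  induction a with
  | nil => simp
  | cons x xs ih => simp [List.length, Nat.succ_add, ih]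

lemma pv_getD_append {α} [Inhabited α] (a b : List α) (k : Nat) (d : α) :
    (a ++ b).getD (a.length + k) d = b.getD k d := by
  induction a with
  | nil => simp
  | cons x xs ih => simpa [Nat.succ_add] using ih

lemma pv_getD_append_lt {α} [Inhabited α] (a b : List α) (k : Nat) (d : α) (hk : k < a.length) :
    (a ++ b).getD k d = a.getD k d := by
  simp [List.getD, List.getElem?_append_left hk]

lemma pv_getD_set_self (m : List (List Int)) (i : Nat) (r : List Int) (hi : i < m.length) :
    (m.set i r).getD i [] = r := by
  simp [List.getD, List.getElem?_set_self, hi]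

lemma pv_getD_set_ne (m : List (List Int)) (i j : Nat) (r : List Int) (hij : j ≠ i) :
    (m.set i r).getD j [] = m.getD j [] := by
  simp [List.getD, List.getElem?_set_ne (by omega : i ≠ j)]

-- fold over range setting cells of one fixed row i reduces to a row-level fold
lemma pv_fold_localize (step : List Int → List Int → Nat → Int) (i : Nat) (hi : 1 ≤ i) :
    ∀ (N : Nat) (m : List (List Int)), i < m.length →
      (List.range N).foldl
        (fun m j' => pvSet2 m i (j' + 1) (step (m.getD (i - 1) []) (m.getD i []) j')) m
      = m.set i ((List.range N).foldl
          (fun r j' => r.set (j' + 1) (step (m.getD (i - 1) []) r j')) (m.getD i [])) := by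
  intro N
  induction N with
  | zero =>
    intro m hm
    simp only [List.range_zero, List.foldl_nil, List.getD, List.getElem?_eq_getElem hm, Option.getD_some]
    exact (List.set_getElem_self ..).symm
  | succ N ihN =>
    intro m hm
    simp only [List.range_succ, List.foldl_append, List.foldl_cons, List.foldl_nil]
    rw [ihN m hm]
    have h1 : ((m.set i ((List.range N).foldl
        (fun r j' => r.set (j' + 1) (step (m.getD (i - 1) []) r j')) (m.getD i []))).getD (i - 1) [])
        = m.getD (i - 1) [] := pv_getD_set_ne _ _ _ _ (by omega)
    have h2 : ((m.set i ((List.range N).foldl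
        (fun r j' => r.set (j' + 1) (step (m.getD (i - 1) []) r j')) (m.getD i []))).getD i [])
        = (List.range N).foldl (fun r j' => r.set (j' + 1) (step (m.getD (i - 1) []) r j')) (m.getD i []) :=
      pv_getD_set_self _ _ _ hm
    rw [pvSet2, h1, h2, List.set_set]

-- row-0 variant (value independent of the matrix)
lemma pv_fold_row0 (f : Nat → Int) :
    ∀ (N : Nat) (m : List (List Int)), 0 < m.length →
      (List.range N).foldl (fun m j => pvSet2 m 0 j (f j)) m
      = m.set 0 ((List.range N).foldl (fun r j => r.set j (f j)) (m.getD 0 [])) := by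
  intro N
  induction N with
  | zero =>
    intro m hm
    simp only [List.range_zero, List.foldl_nil, List.getD, List.getElem?_eq_getElem hm, Option.getD_some]
    exact (List.set_getElem_self ..).symm
  | succ N ihN =>
    intro m hm
    simp only [List.range_succ, List.foldl_append, List.foldl_cons, List.foldl_nil]
    rw [ihN m hm, pvSet2, pv_getD_set_self _ _ _ hm, List.set_set]

-- filling a row front-to-back, writing position j at step j
lemma pv_fill0 (f : Nat → Int) (n : Nat) :
    ∀ (k : Nat), k ≤ n →
      (List.range k).foldl (fun r j => r.set j (f j)) (List.replicate n (0 : Int))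
      = (List.range k).map f ++ List.replicate (n - k) (0 : Int) := by
  intro k
  induction k with
  | zero => simp
  | succ k ih =>
    intro hk
    have hk' : k ≤ n := by omega
    simp only [List.range_succ, List.foldl_append, List.foldl_cons, List.foldl_nil, List.map_append,
      List.map_cons, List.map_nil]
    rw [ih hk']
    have hlen : ((List.range k).map f).length = k := by simp
    have hrep : List.replicate (n - k) (0 : Int) = 0 :: List.replicate (n - (k + 1)) 0 := by
      have : n - k = (n - (k + 1)) + 1 := by omega
      simp [this, List.replicate_succ]
    calc ((List.range k).map f ++ List.replicate (n - k) (0 : Int)).set k (f k)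
        = (List.range k).map f ++ (List.replicate (n - k) (0 : Int)).set 0 (f k) := by
          have := pv_set_append ((List.range k).map f) (List.replicate (n - k) (0 : Int)) 0 (f k)
          simpa [hlen] using this
      _ = (List.range k).map f ++ [f k] ++ List.replicate (n - (k + 1)) (0 : Int) := by
          simp [hrep]

lemma pv_fill_step (f : Nat → Int) (k n : Nat) (h : k < n) (v : Int) (hv : v = f (k + 1)) :
    (((List.range (k + 1)).map f ++ List.replicate (n - k) (0 : Int)).set (k + 1) v)
      = (List.range (k + 2)).map f ++ List.replicate (n - (k + 1)) (0 : Int) := by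
  subst hv
  have hlen : ((List.range (k + 1)).map f).length = k + 1 := by simp
  have hrep : List.replicate (n - k) (0 : Int) = 0 :: List.replicate (n - (k + 1)) 0 := by
    have : n - k = (n - (k + 1)) + 1 := by omega
    simp [this, List.replicate_succ]
  calc (((List.range (k + 1)).map f ++ List.replicate (n - k) (0 : Int)).set (k + 1) (f (k + 1)))
      = (List.range (k + 1)).map f ++ (List.replicate (n - k) (0 : Int)).set 0 (f (k + 1)) := by
        have := pv_set_append ((List.range (k + 1)).map f) (List.replicate (n - k) (0 : Int)) 0 (f (k + 1))
        simpa [hlen] using this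
    _ = (List.range (k + 2)).map f ++ List.replicate (n - (k + 1)) (0 : Int) := by
        simp [hrep, List.range_succ, List.map_append]

-- the inner (row-level) fold of A computes the next Levenshtein row
lemma pv_rowfold_lev (hyp ref : List String) (i' : Nat) :
    ∀ (k : Nat), k ≤ ref.length →
      (List.range k).foldl
        (fun r j' => r.set (j' + 1)
          (if hyp.getD i' "" == ref.getD j' "" then (pvLevRow hyp ref i').getD j' 0
           else min ((pvLevRow hyp ref i').getD (j' + 1) 0 + 1)
             (min (r.getD j' 0 + 1) ((pvLevRow hyp ref i').getD j' 0 + 1))))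
        (Int.ofNat (i' + 1) :: List.replicate ref.length 0)
      = (List.range (k + 1)).map (pvLev hyp ref (i' + 1)) ++ List.replicate (ref.length - k) (0 : Int) := by
  intro k
  induction k with
  | zero => simp [List.range_succ, pvLev.eq_2]
  | succ k ih =>
    intro hk
    have hk' : k ≤ ref.length := by omega
    simp only [List.range_succ, List.foldl_append, List.foldl_cons, List.foldl_nil]
    rw [ih hk']
    have hprev : ∀ t, t < ref.length + 1 → (pvLevRow hyp ref i').getD t 0 = pvLev hyp ref i' t := by
      intro t ht
      simpa [pvLevRow] using pv_getD_range_map (pvLev hyp ref i') (ref.length + 1) t 0 ht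
    have hcur : ((List.range (k + 1)).map (pvLev hyp ref (i' + 1)) ++ List.replicate (ref.length - k) (0 : Int)).getD k 0
        = pvLev hyp ref (i' + 1) k := by
      rw [pv_getD_append_lt _ _ _ _ (by simp)]
      exact pv_getD_range_map (pvLev hyp ref (i' + 1)) (k + 1) k 0 (by omega)
    rw [hcur, hprev k (by omega), hprev (k + 1) (by omega)]
    rw [pv_fill_step (pvLev hyp ref (i' + 1)) k ref.length (by omega) _ (by rw [pvLev.eq_3])]
    simp [List.range_succ]

-- first-column initialisation, closed form
lemma pv_m1 (H n : Nat) :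
    ∀ (k : Nat), k ≤ H + 1 →
      (List.range k).foldl (fun m i => pvSet2 m i 0 (Int.ofNat i))
        (List.replicate (H + 1) (List.replicate (n + 1) (0 : Int)))
      = (List.range k).map (fun i => Int.ofNat i :: List.replicate n (0 : Int))
        ++ List.replicate (H + 1 - k) (List.replicate (n + 1) (0 : Int)) := by
  intro k
  induction k with
  | zero => simp
  | succ k ih =>
    intro hk
    have hk' : k ≤ H + 1 := by omega
    simp only [List.range_succ, List.foldl_append, List.foldl_cons, List.foldl_nil]
    rw [ih hk']
    have hlen : ((List.range k).map (fun i => Int.ofNat i :: List.replicate n (0 : Int))).length = k := by simp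
    have hrep : List.replicate (H + 1 - k) (List.replicate (n + 1) (0 : Int))
        = List.replicate (n + 1) (0 : Int) :: List.replicate (H + 1 - (k + 1)) (List.replicate (n + 1) (0 : Int)) := by
      have : H + 1 - k = (H + 1 - (k + 1)) + 1 := by omega
      simp [this, List.replicate_succ]
    have hget : ((List.range k).map (fun i => Int.ofNat i :: List.replicate n (0 : Int))
        ++ List.replicate (H + 1 - k) (List.replicate (n + 1) (0 : Int))).getD k []
        = List.replicate (n + 1) (0 : Int) := by
      have := pv_getD_append ((List.range k).map (fun i => Int.ofNat i :: List.replicate n (0 : Int)))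
        (List.replicate (H + 1 - k) (List.replicate (n + 1) (0 : Int))) 0 []
      rw [hlen] at this
      simpa [hrep] using this
    rw [pvSet2, hget]
    have hsetrow : (List.replicate (n + 1) (0 : Int)).set 0 (Int.ofNat k)
        = Int.ofNat k :: List.replicate n (0 : Int) := by
      simp [List.replicate_succ]
    rw [hsetrow]
    have := pv_set_append ((List.range k).map (fun i => Int.ofNat i :: List.replicate n (0 : Int)))
      (List.replicate (H + 1 - k) (List.replicate (n + 1) (0 : Int))) 0
      (Int.ofNat k :: List.replicate n (0 : Int))
    rw [hlen] at this
    simp only [Nat.add_zero] at this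
    rw [this, hrep]
    simp [List.range_succ, List.map_append]

-- after both initialisation loops the matrix is: Levenshtein row 0, then rows (i :: 0 … 0)
lemma pv_m2 (hyp ref : List String) :
    (List.range (ref.length + 1)).foldl (fun m j => pvSet2 m 0 j (Int.ofNat j))
      ((List.range (hyp.length + 1)).foldl (fun m i => pvSet2 m i 0 (Int.ofNat i))
        (List.replicate (hyp.length + 1) (List.replicate (ref.length + 1) (0 : Int))))
    = pvLevRow hyp ref 0
      :: (List.range hyp.length).map (fun t => Int.ofNat (t + 1) :: List.replicate ref.length (0 : Int)) := by
  rw [pv_m1 hyp.length ref.length (hyp.length + 1) le_rfl]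
  simp only [Nat.sub_self, List.replicate_zero, List.append_nil]
  set g : Nat → List Int := fun i => Int.ofNat i :: List.replicate ref.length (0 : Int) with hg
  have hm1 : (List.range (hyp.length + 1)).map g
      = g 0 :: (List.range hyp.length).map (fun t => g (t + 1)) := by
    simp [List.range_succ_eq_map, List.map_map, Function.comp_def]
  have hlen : 0 < ((List.range (hyp.length + 1)).map g).length := by simp
  rw [pv_fold_row0 (fun j => Int.ofNat j) (ref.length + 1) _ hlen]
  have hget0 : ((List.range (hyp.length + 1)).map g).getD 0 []
      = List.replicate (ref.length + 1) (0 : Int) := by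
    rw [pv_getD_range_map g (hyp.length + 1) 0 [] (by omega)]
    simp [hg, List.replicate_succ]
  rw [hget0, pv_fill0 (fun j => Int.ofNat j) (ref.length + 1) (ref.length + 1) le_rfl]
  simp only [Nat.sub_self, List.replicate_zero, List.append_nil]
  rw [hm1]
  simp only [List.set_cons_zero]
  congr 1
  · simp only [pvLevRow]
    exact List.map_congr_left (fun j _ => by rw [pvLev.eq_1])

-- the outer loop invariant
lemma pv_outer (hyp ref : List String) :
    ∀ (k : Nat), k ≤ hyp.length →
      (List.range k).foldl (fun m i' =>
        (List.range ref.length).foldl (fun m j' =>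
          if hyp.getD ((i' + 1) - 1) "" == ref.getD ((j' + 1) - 1) "" then
            pvSet2 m (i' + 1) (j' + 1) (pvGet2 m ((i' + 1) - 1) ((j' + 1) - 1))
          else
            pvSet2 m (i' + 1) (j' + 1) (min (pvGet2 m ((i' + 1) - 1) (j' + 1) + 1)
              (min (pvGet2 m (i' + 1) ((j' + 1) - 1) + 1) (pvGet2 m ((i' + 1) - 1) ((j' + 1) - 1) + 1)))) m)
        (pvLevRow hyp ref 0
          :: (List.range hyp.length).map (fun t => Int.ofNat (t + 1) :: List.replicate ref.length (0 : Int)))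
      = (List.range (k + 1)).map (pvLevRow hyp ref)
        ++ (List.range (hyp.length - k)).map (fun t => Int.ofNat (k + 1 + t) :: List.replicate ref.length (0 : Int)) := by
  intro k
  induction k with
  | zero =>
    intro _
    simp only [List.range_zero, List.foldl_nil, List.range_one, List.map_cons, List.map_nil,
      Nat.sub_zero, List.cons_append, List.nil_append]
    congr 1
    exact List.map_congr_left (fun t _ => by congr 2; omega)
  | succ k ih =>
    intro hk
    have hk' : k ≤ hyp.length := by omega
    simp only [List.range_succ, List.foldl_append, List.foldl_cons, List.foldl_nil]
    rw [ih hk']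
    have hbodyeq : (fun (m : List (List Int)) (j' : Nat) =>
        if hyp.getD ((k + 1) - 1) "" == ref.getD ((j' + 1) - 1) "" then
          pvSet2 m (k + 1) (j' + 1) (pvGet2 m ((k + 1) - 1) ((j' + 1) - 1))
        else
          pvSet2 m (k + 1) (j' + 1) (min (pvGet2 m ((k + 1) - 1) (j' + 1) + 1)
            (min (pvGet2 m (k + 1) ((j' + 1) - 1) + 1) (pvGet2 m ((k + 1) - 1) ((j' + 1) - 1) + 1))))
        = (fun (m : List (List Int)) (j' : Nat) => pvSet2 m (k + 1) (j' + 1)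
            ((fun (prev r : List Int) (j' : Nat) =>
              if hyp.getD k "" == ref.getD j' "" then prev.getD j' 0
              else min (prev.getD (j' + 1) 0 + 1)
                (min (r.getD j' 0 + 1) (prev.getD j' 0 + 1)))
              (m.getD ((k + 1) - 1) []) (m.getD (k + 1) []) j')) := by
      funext m j'
      simp only [Nat.add_sub_cancel, pvGet2]
      split_ifs <;> rfl
    rw [hbodyeq]
    set M := (List.range (k + 1)).map (pvLevRow hyp ref)
      ++ (List.range (hyp.length - k)).map (fun t => Int.ofNat (k + 1 + t) :: List.replicate ref.length (0 : Int)) with hM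
    have hMlen : k + 1 < M.length := by simp [hM]; omega
    rw [pv_fold_localize (fun (prev r : List Int) (j' : Nat) =>
        if hyp.getD k "" == ref.getD j' "" then prev.getD j' 0
        else min (prev.getD (j' + 1) 0 + 1)
          (min (r.getD j' 0 + 1) (prev.getD j' 0 + 1))) (k + 1) (by omega) ref.length M hMlen]
    have hgetprev : M.getD ((k + 1) - 1) [] = pvLevRow hyp ref k := by
      rw [Nat.add_sub_cancel, hM, pv_getD_append_lt _ _ _ _ (by simp)]
      exact pv_getD_range_map (pvLevRow hyp ref) (k + 1) k [] (by omega)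
    have hgetcur : M.getD (k + 1) [] = Int.ofNat (k + 1) :: List.replicate ref.length (0 : Int) := by
      rw [hM]
      have h1 := pv_getD_append ((List.range (k + 1)).map (pvLevRow hyp ref))
        ((List.range (hyp.length - k)).map (fun t => Int.ofNat (k + 1 + t) :: List.replicate ref.length (0 : Int))) 0 []
      simp only [List.length_map, List.length_range, Nat.add_zero] at h1
      rw [h1, pv_getD_range_map _ (hyp.length - k) 0 [] (by omega)]
    rw [hgetprev, hgetcur]
    rw [pv_rowfold_lev hyp ref k ref.length le_rfl]
    simp only [Nat.sub_self, List.replicate_zero, List.append_nil]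
    have hnew : (List.range (ref.length + 1)).map (pvLev hyp ref (k + 1)) = pvLevRow hyp ref (k + 1) := rfl
    rw [hnew, hM]
    have hset := pv_set_append ((List.range (k + 1)).map (pvLevRow hyp ref))
      ((List.range (hyp.length - k)).map (fun t => Int.ofNat (k + 1 + t) :: List.replicate ref.length (0 : Int))) 0
      (pvLevRow hyp ref (k + 1))
    simp only [List.length_map, List.length_range, Nat.add_zero] at hset
    rw [hset]
    have hdec : (List.range (hyp.length - k)).map (fun t => Int.ofNat (k + 1 + t) :: List.replicate ref.length (0 : Int))
        = (Int.ofNat (k + 1) :: List.replicate ref.length (0 : Int))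
          :: (List.range (hyp.length - (k + 1))).map (fun t => Int.ofNat (k + 1 + 1 + t) :: List.replicate ref.length (0 : Int)) := by
      have h2 : hyp.length - k = (hyp.length - (k + 1)) + 1 := by omega
      rw [h2, List.range_succ_eq_map]
      simp only [List.map_cons, List.map_map, Function.comp_def, Nat.add_zero]
      congr 1
      exact List.map_congr_left (fun t _ => by congr 2; omega)
    rw [hdec, List.set_cons_zero]
    simp [List.range_succ, List.map_append]

-- A: the fully initialised-and-filled matrix is the table of pvLev rows
theorem compute_penalty_matrix_matrix_eq (hyp ref : List String) :
    (compute_penalty_matrix hyp ref).1 = (List.range (hyp.length + 1)).map (pvLevRow hyp ref) := by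
  simp only [compute_penalty_matrix]
  have h0 : ((List.range (hyp.length + 1)).map
      (fun _ => (List.range (ref.length + 1)).map (fun _ => (0 : Int))))
      = List.replicate (hyp.length + 1) (List.replicate (ref.length + 1) (0 : Int)) := by
    simp [List.map_const']
  rw [h0, pv_m2 hyp ref, pv_outer hyp ref hyp.length le_rfl]
  simp

-- ===== VERDICT (by name: the statement is the Claim_ definition above) =====
theorem compute_penalty_matrix_spec : Claim_equal_compute_penalty_matrix := by
  intro hyp ref _
  unfold Spec_compute_penalty_matrix
  have hA := compute_penalty_matrix_matrix_eq hyp ref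
  have hB := compute_penalty_matrix_alt_matrix_eq hyp ref
  have h2 : (compute_penalty_matrix hyp ref).2 = (compute_penalty_matrix_alt hyp ref).2 := by
    simp [compute_penalty_matrix, compute_penalty_matrix_alt]
  exact Prod.ext (hA.trans hB.symm) h2
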